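-- pv_equiv track=rewrite | github.com/stefdworschak/advent-of-code-2021 | day8/day8.py | get_strings_of_unique_length
-- ===== SOURCE A (Python) =====
-- def get_strings_of_unique_length(data, len_only=True):
--     counter = {}
--     for k, v in data.items():
--         counter.setdefault(len(v), [])
--         counter[len(v)].append(k)
--     unique_indexes = [v[0] for v in counter.values() if len(v) == 1]
--     if len_only:
--         return [len(v) for k, v in data.items() if k in unique_indexes]
--     return {len(v): v for k, v in data.items() if k in unique_indexes}
-- ===== SOURCE B (Python) =====
-- def get_strings_of_unique_length(data, len_only=True):
--     # Sort the value lengths, then one run-length scan over the sorted list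
--     # collects the lengths whose run has size 1 (i.e. lengths that occur once).
--     lengths = sorted(len(v) for v in data.values())
--     unique = set()
--     i = 0
--     while i < len(lengths):
--         j = i + 1
--         while j < len(lengths) and lengths[j] == lengths[i]:
--             j += 1
--         if j == i + 1:
--             unique.add(lengths[i])
--         i = j
--     if len_only:
--         return [len(v) for v in data.values() if len(v) in unique]
--     return {len(v): v for v in data.values() if len(v) in unique}
-- ===== Notes on version B (the rewrite author's own statement) =====
-- stated objective: alternative
-- what changed: B sorts the value lengths and finds the once-occurring lengths by a single run-length scan over the sorted list (runs of size 1), then filters data.values() by membership in that set; A's dict grouping keys per length, the singleton-representative extraction and the key-membership test are gone entirely.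
-- outside the precondition, e.g. on get_strings_of_unique_length({'a': 'x'}, False): A returns {1: 'x'}, B returns {1: 'x'}
import Mathlib
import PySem

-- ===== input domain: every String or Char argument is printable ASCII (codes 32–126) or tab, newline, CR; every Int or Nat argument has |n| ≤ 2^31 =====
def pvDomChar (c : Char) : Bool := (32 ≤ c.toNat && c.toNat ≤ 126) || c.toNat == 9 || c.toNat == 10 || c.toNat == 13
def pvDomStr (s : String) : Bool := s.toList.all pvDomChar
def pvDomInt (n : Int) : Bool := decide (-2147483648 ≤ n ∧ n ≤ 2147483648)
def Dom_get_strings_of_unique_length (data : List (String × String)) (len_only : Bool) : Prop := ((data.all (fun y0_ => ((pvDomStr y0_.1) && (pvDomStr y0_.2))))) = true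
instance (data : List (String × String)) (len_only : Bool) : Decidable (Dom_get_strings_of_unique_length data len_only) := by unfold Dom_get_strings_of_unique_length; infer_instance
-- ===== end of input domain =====

-- B replaces A's per-length grouping of keys and the representative-key membership test by
-- sorting the value lengths and collecting size-1 runs in one scan (objective: alternative).

-- ===== PORT A =====
-- counter.setdefault(len(v), []); counter[len(v)].append(k)  ==  counter[len(v)] = counter.get(len(v), []) + [k],
-- which is exactly Dict.modify.  v[0] on a list checked to have length 1 is ported as headD "".
def get_strings_of_unique_length (data : List (String × String)) (len_only : Bool) : List Int :=
  let counter : PySem.Dict Int (List String) :=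
    data.foldl (fun d kv => d.modify (PySem.Str.len kv.2) [] (· ++ [kv.1])) PySem.Dict.empty
  let unique_indexes : List String :=
    (counter.values.filter (fun g => g.length == 1)).map (fun g => g.headD "")
  if len_only then
    (data.filter (fun kv => unique_indexes.contains kv.1)).map (fun kv => PySem.Str.len kv.2)
  else []  -- len_only = false returns a dict in Python (not a List Int); excluded by Pre_

-- ===== PORT B =====
-- the two while loops of Source B: the inner 'while lengths[j] == lengths[i]: j += 1' is the
-- takeWhile/dropWhile split of the current run; 'if j == i + 1' is 'run of size 1'.
def pvRuns : List Int → List Int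
  | [] => []
  | x :: xs =>
      if xs.takeWhile (· == x) = [] then x :: pvRuns (xs.dropWhile (· == x))
      else pvRuns (xs.dropWhile (· == x))
termination_by l => l.length
decreasing_by all_goals · simp only [List.length_cons]; exact Nat.lt_succ_of_le (xs.length_dropWhile_le _)

def get_strings_of_unique_length_alt (data : List (String × String)) (len_only : Bool) : List Int :=
  let lengths : List Int := data.map (fun kv => PySem.Str.len kv.2)
  let sortedL : List Int := PySem.List.sorted lengths (fun x => x) false
  let unique : List Int := pvRuns sortedL   -- the Python set 'unique' (runs are distinct)
  if len_only then
    lengths.filter (fun n => unique.contains n)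
  else []  -- len_only = false returns a dict in Python (not a List Int); excluded by Pre_

-- ===== PRECONDITION & SPEC =====
-- Pre_ excludes len_only = false, on which A returns a dict — not a value of the declared
-- List Int result type.  The Nodup conjunct is the dict representation invariant (data models
-- a Python dict, whose keys are always distinct), so it excludes no Python-reachable input.
def Pre_get_strings_of_unique_length (data : List (String × String)) (len_only : Bool) : Prop :=
  len_only = true ∧ (data.map Prod.fst).Nodup
instance (data : List (String × String)) (len_only : Bool) : Decidable (Pre_get_strings_of_unique_length data len_only) := by unfold Pre_get_strings_of_unique_length; infer_instance
def pvWitness_get_strings_of_unique_length : (List (String × String)) × Bool :=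
  ([("ab", "x"), ("cd", "yz")], true)
def Spec_get_strings_of_unique_length (data : List (String × String)) (len_only : Bool) (out : List Int) : Prop := out = get_strings_of_unique_length_alt data len_only
instance (data : List (String × String)) (len_only : Bool) (out : List Int) : Decidable (Spec_get_strings_of_unique_length data len_only out) := by unfold Spec_get_strings_of_unique_length; infer_instance

-- ===== CLAIM (what is proved, stated in full; the proofs are below) =====
def Claim_equal_get_strings_of_unique_length : Prop := ∀ (data : List (String × String)) (len_only : Bool), Dom_get_strings_of_unique_length data len_only → Pre_get_strings_of_unique_length data len_only → Spec_get_strings_of_unique_length data len_only (get_strings_of_unique_length data len_only)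

-- ===== LEMMAS AND PROOFS =====

-- in a ≤-sorted list headed by h, once the leading h-run is dropped no h remains
theorem pv_not_mem_dropWhile (h : Int) (xs : List Int)
    (hp : xs.Pairwise (· ≤ ·)) (hge : ∀ y ∈ xs, h ≤ y) :
    h ∉ xs.dropWhile (· == h) := by
  induction xs with
  | nil => simp
  | cons a t ih =>
      by_cases hah : a = h
      · subst hah
        rw [List.dropWhile_cons_of_pos (by simp)]
        exact ih (List.Pairwise.of_cons hp) (fun y hy => hge y (List.mem_cons_of_mem a hy))
      · rw [List.dropWhile_cons_of_neg (by simpa using hah)]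
        intro hmem
        rcases List.mem_cons.mp hmem with rfl | hmem
        · exact hah rfl
        · have h1 : a ≤ h := (List.pairwise_cons.mp hp).1 h hmem
          have h2 : h ≤ a := hge a List.mem_cons_self
          exact hah (le_antisymm h1 h2)

-- pvRuns only returns elements of its argument
theorem pv_mem_pvRuns_subset (l : List Int) (y : Int) (h : y ∈ pvRuns l) : y ∈ l := by
  induction l using pvRuns.induct with
  | case1 => simp [pvRuns] at h
  | case2 x xs htw ih =>
      rw [pvRuns, if_pos htw] at h
      rcases List.mem_cons.mp h with rfl | h
      · exact List.mem_cons_self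
      · exact List.mem_cons_of_mem _ ((List.dropWhile_sublist _).subset (ih h))
  | case3 x xs htw ih =>
      rw [pvRuns, if_neg htw] at h
      exact List.mem_cons_of_mem _ ((List.dropWhile_sublist _).subset (ih h))

-- membership in pvRuns of a ≤-sorted list is exactly multiplicity 1
theorem pv_mem_pvRuns_iff (l : List Int) (hp : l.Pairwise (· ≤ ·)) (y : Int) :
    y ∈ pvRuns l ↔ l.count y = 1 := by
  induction l using pvRuns.induct with
  | case1 => simp [pvRuns]
  | case2 x xs htw ih =>
      have hge : ∀ z ∈ xs, x ≤ z := fun z hz => (List.pairwise_cons.mp hp).1 z hz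
      have hrest : (xs.dropWhile (· == x)).Pairwise (· ≤ ·) :=
        (List.Pairwise.of_cons hp).sublist (List.dropWhile_sublist _)
      have hnx : x ∉ xs.dropWhile (· == x) :=
        pv_not_mem_dropWhile x xs (List.Pairwise.of_cons hp) hge
      have hdw : xs.dropWhile (· == x) = xs := by
        conv_rhs => rw [← List.takeWhile_append_dropWhile (p := (· == x)) (l := xs)]
        rw [htw]; simp
      rw [pvRuns, if_pos htw]
      by_cases hyx : y = x
      · subst hyx
        have hcnt : (y :: xs).count y = 1 := by
          have h0 : xs.count y = 0 := by
            rw [← hdw]; exact List.count_eq_zero.mpr hnx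
          simp [h0]
        simp [hcnt]
      · have hcc : (x :: xs).count y = xs.count y := by
          simp [Ne.symm hyx]
        rw [hdw] at ih hrest
        rw [hdw, hcc]
        simp only [List.mem_cons, hyx, false_or]
        exact ih hrest
  | case3 x xs htw ih =>
      have hge : ∀ z ∈ xs, x ≤ z := fun z hz => (List.pairwise_cons.mp hp).1 z hz
      have hrest : (xs.dropWhile (· == x)).Pairwise (· ≤ ·) :=
        (List.Pairwise.of_cons hp).sublist (List.dropWhile_sublist _)
      have hnx : x ∉ xs.dropWhile (· == x) :=
        pv_not_mem_dropWhile x xs (List.Pairwise.of_cons hp) hge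
      have hsplit : xs = xs.takeWhile (· == x) ++ xs.dropWhile (· == x) :=
        (List.takeWhile_append_dropWhile).symm
      have htwall : ∀ z ∈ xs.takeWhile (· == x), z = x := by
        intro z hz
        have := List.mem_takeWhile_imp hz
        simpa using this
      rw [pvRuns, if_neg htw]
      by_cases hyx : y = x
      · subst hyx
        constructor
        · intro hmem
          exact absurd (pv_mem_pvRuns_subset _ _ hmem) hnx
        · intro hcnt
          exfalso
          have h0 : (xs.dropWhile (· == y)).count y = 0 := List.count_eq_zero.mpr hnx
          have hlen1 : (xs.takeWhile (· == y)).count y = (xs.takeWhile (· == y)).length :=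
            List.count_eq_length.mpr (fun b hb => (htwall b hb).symm)
          have h1 : (y :: xs).count y = 1 + (xs.takeWhile (· == y)).length := by
            rw [List.count_cons_self]
            conv_lhs => rw [hsplit, List.count_append, h0, hlen1]
            omega
          have h2 : (xs.takeWhile (· == y)).length ≠ 0 := by
            simpa [List.length_eq_zero_iff] using htw
          omega
      · have htc : (xs.takeWhile (· == x)).count y = 0 :=
          List.count_eq_zero.mpr (fun hmem => hyx (htwall y hmem))
        have hxx : xs.count y = (xs.dropWhile (· == x)).count y := by
          conv_lhs => rw [hsplit, List.count_append, htc]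
          omega
        have hcc : (x :: xs).count y = xs.count y := by
          simp [Ne.symm hyx]
        rw [hcc, hxx]
        exact ih hrest

-- A's counter group for length c is the keys of the entries of that length, in order
theorem pv_group_spec (data : List (String × String)) (c : Int) :
    (data.foldl (fun d kv => d.modify (PySem.Str.len kv.2) [] (· ++ [kv.1]))
        (PySem.Dict.empty : PySem.Dict Int (List String))).getD c []
      = (data.filter (fun kv => PySem.Str.len kv.2 == c)).map Prod.fst := by
  have h : data.foldl (fun d kv => d.modify (PySem.Str.len kv.2) [] (· ++ [kv.1]))
        (PySem.Dict.empty : PySem.Dict Int (List String))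
      = ((data.map (fun kv => ((PySem.Str.len kv.2, kv.1) : Int × String))).foldl
          (fun d p => d.modify p.1 [] (· ++ [p.2])) PySem.Dict.empty) :=
    (List.foldl_map (f := fun kv : String × String => ((PySem.Str.len kv.2, kv.1) : Int × String))
      (g := fun (d : PySem.Dict Int (List String)) p => d.modify p.1 [] (· ++ [p.2]))
      (l := data) (init := PySem.Dict.empty)).symm
  rw [h, PySem.Dict.getD_foldl_modify_append]
  simp [List.filter_map, List.map_map, Function.comp_def]

-- A's counter keys are the distinct value lengths, in first-occurrence order
theorem pv_keys_spec (data : List (String × String)) :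
    (data.foldl (fun d kv => d.modify (PySem.Str.len kv.2) [] (· ++ [kv.1]))
        (PySem.Dict.empty : PySem.Dict Int (List String))).keys
      = PySem.Set.ofList (data.map (fun kv => PySem.Str.len kv.2)) := by
  rw [PySem.Dict.keys_foldl_modify_key]
  simp [PySem.Set.update_nil_left, PySem.Dict.keys_empty]

-- the size of a group is the multiplicity of its length
theorem pv_group_len (data : List (String × String)) (c : Int) :
    ((data.filter (fun kv => PySem.Str.len kv.2 == c)).map Prod.fst).length
      = (data.map (fun kv => PySem.Str.len kv.2)).count c := by
  simp [List.count_eq_countP, List.countP_eq_length_filter, List.filter_map, Function.comp_def]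

-- an entry's key lies in A's unique_indexes iff its value's length has multiplicity 1
theorem pv_mem_unique_iff (data : List (String × String))
    (hnd : (data.map Prod.fst).Nodup) (kv : String × String) (hkv : kv ∈ data) :
    (kv.1 ∈ (((data.foldl (fun d kv => d.modify (PySem.Str.len kv.2) [] (· ++ [kv.1]))
          (PySem.Dict.empty : PySem.Dict Int (List String))).values.filter
            (fun g => g.length == 1)).map (fun g => g.headD "")))
      ↔ (data.map (fun kv => PySem.Str.len kv.2)).count (PySem.Str.len kv.2) = 1 := by
  set d := data.foldl (fun d kv => d.modify (PySem.Str.len kv.2) [] (· ++ [kv.1]))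
      (PySem.Dict.empty : PySem.Dict Int (List String)) with hd
  have hnk : d.keys.Nodup := by
    rw [hd, pv_keys_spec]; exact PySem.Set.nodup_ofList _
  have hv : d.values = d.keys.map (fun n => d.getD n []) :=
    PySem.Dict.values_eq_map_keys d hnk []
  rw [hv, hd, pv_keys_spec]
  simp only [List.filter_map, List.mem_map, List.mem_filter, Function.comp_def,
    pv_group_spec, PySem.Set.mem_ofList, List.mem_map, beq_iff_eq]
  constructor
  · rintro ⟨g, ⟨n, ⟨hn, hlen⟩, rfl⟩, hhead⟩
    obtain ⟨a, ha⟩ := List.length_eq_one_iff.mp hlen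
    have hmem : kv.1 ∈ (data.filter (fun kv => PySem.Str.len kv.2 == n)).map Prod.fst := by
      rw [ha] at hhead ⊢; simp at hhead; simp [hhead]
    obtain ⟨kv', hkv', h1⟩ := List.mem_map.mp hmem
    have hkv'd : kv' ∈ data := (List.mem_filter.mp hkv').1
    have hee : kv' = kv := List.inj_on_of_nodup_map hnd hkv'd hkv h1
    have hn' : PySem.Str.len kv'.2 = n := by
      have := (List.mem_filter.mp hkv').2; simpa using this
    rw [← pv_group_len]
    rw [← hee, hn', hlen]
  · intro hcount
    refine ⟨_, ⟨PySem.Str.len kv.2, ⟨⟨kv, hkv, rfl⟩, ?_⟩, rfl⟩, ?_⟩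
    · rw [pv_group_len]; exact hcount
    · have h1 : ((data.filter (fun kv' => PySem.Str.len kv'.2 == PySem.Str.len kv.2)).map Prod.fst).length = 1 := by
        rw [pv_group_len]; exact hcount
      have hm : kv.1 ∈ (data.filter (fun kv' => PySem.Str.len kv'.2 == PySem.Str.len kv.2)).map Prod.fst :=
        List.mem_map.mpr ⟨kv, List.mem_filter.mpr ⟨hkv, by simp⟩, rfl⟩
      obtain ⟨a, ha⟩ := List.length_eq_one_iff.mp h1
      rw [ha] at hm ⊢
      simp at hm; simp [hm]

-- ===== VERDICT (by name: the statement is the Claim_ definition above) =====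
theorem get_strings_of_unique_length_spec : Claim_equal_get_strings_of_unique_length := by
  intro data len_only _ hpre
  obtain ⟨hl, hnd⟩ := hpre
  subst hl
  unfold Spec_get_strings_of_unique_length get_strings_of_unique_length get_strings_of_unique_length_alt
  show (data.filter _).map _ = (data.map _).filter _
  set lengths : List Int := data.map (fun kv => PySem.Str.len kv.2) with hlen
  have hsp : (PySem.List.sorted lengths (fun x => x) false).Pairwise (· ≤ ·) := by
    simpa using PySem.List.sorted_pairwise (xs := lengths) (key := fun x => x)
  have hperm : (PySem.List.sorted lengths (fun x => x) false).Perm lengths :=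
    PySem.List.sorted_perm lengths (fun x => x) false
  rw [List.filter_congr (l := data)
      (q := (fun n => (pvRuns (PySem.List.sorted lengths (fun x => x) false)).contains n)
        ∘ (fun kv => PySem.Str.len kv.2)) ?_]
  · exact (List.filter_map (f := fun kv : String × String => PySem.Str.len kv.2)
      (p := fun n => (pvRuns (PySem.List.sorted lengths (fun x => x) false)).contains n)
      (l := data)).symm
  intro kv hkv
  have hmem := pv_mem_unique_iff data hnd kv hkv
  simp only [Function.comp]
  rw [Bool.eq_iff_iff]
  simp only [List.contains_iff_mem]
  rw [hmem, pv_mem_pvRuns_iff _ hsp, hperm.count_eq]
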